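-- pv_equiv track=rewrite | github.com/JaviBT/advent-of-code | 2024/9/part2.py | calc_free_space
-- ===== SOURCE A (Python) =====
-- def calc_free_space(block):
--     free_space = {}
--
--     i = 0
--     while i < len(block):
--         if block[i] == '.':
--             start_idx = i
--             while i < len(block) and block[i] == '.':
--                 i += 1
--             end_idx = i
--             if end_idx - start_idx not in free_space:
--                 free_space[end_idx - start_idx] = []
--             free_space[end_idx - start_idx].append(start_idx)
--             free_space[end_idx - start_idx] = sorted(free_space[end_idx - start_idx])
--         else:
--             i += 1
--
--     return free_space
-- ===== SOURCE B (Python) =====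
-- def calc_free_space(block):
--     # Staged: (1) collect '.' positions, (2) group consecutive positions into
--     # [start, length] runs by integer arithmetic, (3) bucket starts by length.
--     dots = [i for i, s in enumerate(block) if s == '.']
--     runs = []
--     for idx in dots:
--         if runs and idx == runs[-1][0] + runs[-1][1]:
--             runs[-1][1] += 1
--         else:
--             runs.append([idx, 1])
--     free_space = {}
--     for start, length in runs:
--         free_space.setdefault(length, []).append(start)
--     return free_space
-- ===== Notes on version B (the rewrite author's own statement) =====
-- stated objective: alternative
-- what changed: Replaces A's index-walking outer loop with a nested run-consuming while and a redundant re-sort by three staged passes: collect the positions of '.' entries, group consecutive positions into (start, length) runs by integer arithmetic, then bucket the run starts by length via setdefault, with no nested scan and no sorting.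
import Mathlib
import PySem

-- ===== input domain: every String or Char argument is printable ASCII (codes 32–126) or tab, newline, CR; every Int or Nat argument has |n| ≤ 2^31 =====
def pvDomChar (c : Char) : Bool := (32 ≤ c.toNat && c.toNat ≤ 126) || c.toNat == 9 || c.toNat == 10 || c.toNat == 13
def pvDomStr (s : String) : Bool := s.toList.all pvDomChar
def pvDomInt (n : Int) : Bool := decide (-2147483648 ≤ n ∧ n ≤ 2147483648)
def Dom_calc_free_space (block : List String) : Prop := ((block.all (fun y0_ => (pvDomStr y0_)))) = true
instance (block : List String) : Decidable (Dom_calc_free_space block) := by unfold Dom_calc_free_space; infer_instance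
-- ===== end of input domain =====

-- B replaces A's index-walking scan with nested run-consuming while and redundant re-sort
-- by three staged passes: collect '.' positions, group consecutive positions into runs,
-- bucket run starts by length (objective: alternative; return value only, no mutation).

-- ===== PORT A =====
-- inner while `while i < len(block) and block[i] == '.': i += 1`, over the suffix of block
-- starting at the current position, carrying the Python index i; exact.
def pvInnerA (l : List String) (i : Int) : List String × Int :=
  match l with
  | [] => ([], i)
  | s :: rest => if s == "." then pvInnerA rest (i + 1) else (s :: rest, i)

theorem pvInnerA_fst_length_le (l : List String) (i : Int) : (pvInnerA l i).1.length ≤ l.length := by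
  induction l generalizing i with
  | nil => simp [pvInnerA]
  | cons s rest ih =>
    simp only [pvInnerA]
    split
    · exact le_trans (ih (i + 1)) (Nat.le_succ _)
    · simp

-- outer while loop of A over the suffix of block starting at Python index i; the branch
-- `block[i] == '.'` already consumes the first '.'; the inner while continues from i+1 (exact).
def calc_free_space_go (block : List String) (i : Int)
    (fs : PySem.Dict Int (List Int)) : PySem.Dict Int (List Int) :=
  match block with
  | [] => fs
  | s :: rest =>
    if s == "." then
      let r := pvInnerA rest (i + 1)
      let n := r.2 - i   -- end_idx - start_idx
      let fs1 := if fs.contains n then fs else fs.insert n []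
      calc_free_space_go r.1 r.2
        (fs1.insert n (PySem.List.sorted (fs1.getD n [] ++ [i]) (fun x => x) false))
    else calc_free_space_go rest (i + 1) fs
termination_by block.length
decreasing_by
  · exact Nat.lt_succ_of_le (pvInnerA_fst_length_le rest (i + 1))
  · simp

def calc_free_space (block : List String) : List (Int × List Int) :=
  (calc_free_space_go block 0 PySem.Dict.empty).items

-- ===== PORT B =====
-- stage 1: `dots = [i for i, s in enumerate(block) if s == '.']`
def pvDotsB (block : List String) : List Int :=
  ((PySem.List.enumerate block).filter (fun p => p.2 == ".")).map (fun p => p.1)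

-- stage 2 loop body; Python appends/mutates runs[-1], so the accumulator holds the runs
-- list back-to-front (head = runs[-1]) and is reversed once after the fold.
def pvGroupStep (acc : List (Int × Int)) (idx : Int) : List (Int × Int) :=
  match acc with
  | (s, l) :: rest => if idx == s + l then (s, l + 1) :: rest else (idx, 1) :: (s, l) :: rest
  | [] => [(idx, 1)]

-- stage 3 body: `free_space.setdefault(length, []).append(start)`
def pvBucket (fs : PySem.Dict Int (List Int)) (start len : Int) : PySem.Dict Int (List Int) :=
  let d1 := fs.setdefault len []
  d1.insert len (d1.getD len [] ++ [start])

def calc_free_space_alt (block : List String) : List (Int × List Int) :=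
  let dots := pvDotsB block
  let runs := (dots.foldl pvGroupStep []).reverse
  (runs.foldl (fun fs p => pvBucket fs p.1 p.2) PySem.Dict.empty).items

-- ===== PRECONDITION & SPEC =====
def Spec_calc_free_space (block : List String) (out : List (Int × List Int)) : Prop := out = calc_free_space_alt block
instance (block : List String) (out : List (Int × List Int)) : Decidable (Spec_calc_free_space block out) := by unfold Spec_calc_free_space; infer_instance

-- ===== CLAIM (what is proved, stated in full; the proofs are below) =====
def Claim_equal_calc_free_space : Prop := ∀ (block : List String), Dom_calc_free_space block → Spec_calc_free_space block (calc_free_space block)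

-- ===== LEMMAS AND PROOFS =====

-- Reference decomposition: the maximal '.'-runs of l, as (start index, length) pairs,
-- when l sits at Python index i.
def pvRunsOf (l : List String) (i : Int) : List (Int × Int) :=
  match l with
  | [] => []
  | s :: rest =>
    if s == "." then
      (i, 1 + ((rest.takeWhile (· == ".")).length : Int)) ::
        pvRunsOf (rest.dropWhile (· == ".")) (i + 1 + ((rest.takeWhile (· == ".")).length : Int))
    else pvRunsOf rest (i + 1)
termination_by l.length
decreasing_by
  · exact Nat.lt_succ_of_le (List.length_dropWhile_le _ _)
  · simp

-- '.' positions of l when it sits at index i (stage 1, reference form).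
def pvDotsFrom (l : List String) (i : Int) : List Int :=
  match l with
  | [] => []
  | s :: rest => if s == "." then i :: pvDotsFrom rest (i + 1) else pvDotsFrom rest (i + 1)

theorem pvDotsB_eq (block : List String) : ∀ i : Int,
    ((PySem.List.enumerate block i).filter (fun p => p.2 == ".")).map (fun p => p.1)
      = pvDotsFrom block i := by
  induction block with
  | nil => intro i; simp [PySem.List.enumerate_nil, pvDotsFrom]
  | cons s rest ih =>
    intro i
    rw [PySem.List.enumerate_cons]
    by_cases hs : (s == ".") = true
    · simp [hs, pvDotsFrom, ih]
    · have hs' : (s == ".") = false := by simpa using hs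
      simp [hs', pvDotsFrom, ih]

theorem pvDotsFrom_append (a b : List String) (i : Int) :
    pvDotsFrom (a ++ b) i = pvDotsFrom a i ++ pvDotsFrom b (i + (a.length : Int)) := by
  induction a generalizing i with
  | nil => simp [pvDotsFrom]
  | cons s rest ih =>
    simp only [List.cons_append, pvDotsFrom, List.length_cons]
    have harg : i + 1 + (rest.length : Int) = i + ((rest.length + 1 : Nat) : Int) := by
      push_cast; ring
    split
    · rw [ih, harg, List.cons_append]
    · rw [ih, harg]

theorem pvDotsFrom_ge (l : List String) (i : Int) : ∀ d ∈ pvDotsFrom l i, i ≤ d := by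
  induction l generalizing i with
  | nil => simp [pvDotsFrom]
  | cons s rest ih =>
    intro d hd
    simp only [pvDotsFrom] at hd
    split at hd
    · rcases List.mem_cons.mp hd with rfl | hd
      · exact le_refl _
      · exact le_trans (by omega) (ih (i + 1) d hd)
    · exact le_trans (by omega) (ih (i + 1) d hd)

-- grouping a consecutive block of dot positions merges into the open head run
theorem pvGroup_dots (T : List String) (hT : ∀ x ∈ T, x = ".") :
    ∀ (s len : Int) (rest : List (Int × Int)),
    (pvDotsFrom T (s + len)).foldl pvGroupStep ((s, len) :: rest)
      = (s, len + (T.length : Int)) :: rest := by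
  induction T with
  | nil => intro s len rest; simp [pvDotsFrom]
  | cons x T' ih =>
    intro s len rest
    have hx : x = "." := hT x List.mem_cons_self
    subst hx
    simp only [pvDotsFrom, if_pos (by decide : (("." : String) == ".") = true), List.foldl_cons]
    have hstep : pvGroupStep ((s, len) :: rest) (s + len) = (s, len + 1) :: rest := by
      simp [pvGroupStep]
    rw [hstep]
    have : s + len + 1 = s + (len + 1) := by ring
    rw [this, ih (fun y hy => hT y (List.mem_cons_of_mem _ hy))]
    congr 2
    simp only [List.length_cons]
    push_cast
    ring

theorem pvDropWhile_head (l : List String) (s : String) (r : List String)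
    (h : l.dropWhile (· == ".") = s :: r) : s ≠ "." := by
  induction l with
  | nil => simp at h
  | cons a rest ih =>
    rw [List.dropWhile_cons] at h
    split at h
    · exact ih h
    · next hc =>
      cases h
      simpa using hc

-- main stage-2 lemma: grouping the dot positions yields the runs, back-to-front
theorem pvGroup_main : ∀ (N : Nat) (l : List String), l.length ≤ N → ∀ (i : Int)
    (acc : List (Int × Int)),
    (∀ s len rest, acc = (s, len) :: rest → ∀ d ∈ pvDotsFrom l i, s + len < d) →
    (pvDotsFrom l i).foldl pvGroupStep acc = (pvRunsOf l i).reverse ++ acc := by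
  intro N
  induction N with
  | zero =>
    intro l hl i acc _
    obtain rfl := List.length_eq_zero_iff.mp (Nat.le_zero.mp hl)
    simp [pvDotsFrom, pvRunsOf]
  | succ N ih =>
    intro l hl i acc hacc
    cases l with
    | nil => simp [pvDotsFrom, pvRunsOf]
    | cons s rest =>
      have hrest : rest.length ≤ N := Nat.le_of_succ_le_succ hl
      by_cases hs : (s == ".") = true
      · have hsd : s = "." := by simpa using hs
        subst hsd
        set T := rest.takeWhile (· == ".") with hT
        set R := rest.dropWhile (· == ".") with hR
        have hTall : ∀ x ∈ T, x = "." := by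
          intro x hx
          have := List.mem_takeWhile_imp (hT ▸ hx)
          simpa using this
        have hsplit : rest = T ++ R := (List.takeWhile_append_dropWhile).symm
        simp only [pvDotsFrom, if_pos hs, List.foldl_cons]
        have hstep : pvGroupStep acc i = (i, 1) :: acc := by
          cases acc with
          | nil => rfl
          | cons p rest' =>
            obtain ⟨ps, pl⟩ := p
            have hlt : ps + pl < i := hacc ps pl rest' rfl i (by
              simp [pvDotsFrom])
            have hne : ¬ i = ps + pl := by omega
            simp [pvGroupStep, hne]
        have hdots : pvDotsFrom rest (i + 1)
            = pvDotsFrom T (i + 1) ++ pvDotsFrom R (i + 1 + (T.length : Int)) := by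
          conv_lhs => rw [hsplit]
          rw [pvDotsFrom_append]
        have h1 : (pvDotsFrom T (i + 1)).foldl pvGroupStep ((i, 1) :: acc)
            = (i, 1 + (T.length : Int)) :: acc := pvGroup_dots T hTall i 1 acc
        rw [hstep, hdots, List.foldl_append, h1]
        have hRlen : R.length ≤ N := le_trans (hR ▸ List.length_dropWhile_le _ _) hrest
        have hrec := ih R hRlen (i + 1 + (T.length : Int)) ((i, 1 + (T.length : Int)) :: acc)
          (by
            intro s' len' rest' heq d hd
            cases heq
            have : i + 1 + (T.length : Int) < d := by
              cases hRe : R with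
              | nil =>
                rw [hRe] at hd
                simp [pvDotsFrom] at hd
              | cons x R' =>
                have hx : (x == ".") = false := by
                  simpa using pvDropWhile_head rest x R' (by rw [← hR, hRe])
                rw [hRe] at hd
                simp only [pvDotsFrom, hx, if_false, Bool.false_eq_true] at hd
                have := pvDotsFrom_ge R' (i + 1 + (T.length : Int) + 1) d hd
                omega
            omega)
        rw [hrec]
        show _ = (pvRunsOf ("." :: rest) i).reverse ++ acc
        rw [pvRunsOf, if_pos hs, ← hT, ← hR]
        simp [List.reverse_cons, List.append_assoc]
      · have hs' : (s == ".") = false := by simpa using hs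
        rw [show pvDotsFrom (s :: rest) i = pvDotsFrom rest (i + 1) by
              rw [pvDotsFrom, if_neg (by simp [hs'])],
            show pvRunsOf (s :: rest) i = pvRunsOf rest (i + 1) by
              rw [pvRunsOf, if_neg (by simp [hs'])]]
        exact ih rest hrest (i + 1) acc (by
          intro s' len' rest' heq d hd
          exact hacc s' len' rest' heq d (by simp [pvDotsFrom, hs', hd]))

-- ===== A-side: the dict invariant and the equality with the runs fold =====

-- every list stored in the dict is strictly increasing and below the current index
def pvInv (fs : PySem.Dict Int (List Int)) (i : Int) : Prop :=
  ∀ n l, fs.get? n = some l → l.Pairwise (· < ·) ∧ ∀ x ∈ l, x < i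

theorem pvInv_mono {fs : PySem.Dict Int (List Int)} {i j : Int} (h : pvInv fs i) (hij : i ≤ j) :
    pvInv fs j := by
  intro n l hq
  exact ⟨(h n l hq).1, fun x hx => lt_of_lt_of_le ((h n l hq).2 x hx) hij⟩

theorem pvInv_getD {fs : PySem.Dict Int (List Int)} {i : Int} (h : pvInv fs i) (n : Int) :
    (fs.getD n []).Pairwise (· < ·) ∧ ∀ x ∈ fs.getD n [], x < i := by
  cases hq : fs.get? n with
  | none => simp [PySem.Dict.getD_eq_get?_getD, hq]
  | some l => simpa [PySem.Dict.getD_eq_get?_getD, hq] using h n l hq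

theorem pvInv_upd {fs : PySem.Dict Int (List Int)} {start : Int} (n j : Int)
    (h : pvInv fs start) (hsj : start < j) : pvInv (pvBucket fs start n) j := by
  intro m l hq
  have hd : (fs.setdefault n []).getD n [] = fs.getD n [] :=
    PySem.Dict.getD_setdefault_self fs n [] []
  by_cases hm : m = n
  · subst hm
    rw [pvBucket, PySem.Dict.get?_insert_self] at hq
    obtain ⟨hp, hb⟩ := pvInv_getD h m
    have hl := Option.some.inj hq
    subst hl
    rw [hd]
    constructor
    · rw [List.pairwise_append]
      refine ⟨hp, List.pairwise_singleton _ _, fun a ha b hb' => ?_⟩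
      simp only [List.mem_singleton] at hb'
      subst hb'
      exact hb a ha
    · intro x hx
      rcases List.mem_append.mp hx with hx | hx
      · exact lt_trans (hb x hx) hsj
      · simp only [List.mem_singleton] at hx
        subst hx
        exact hsj
  · rw [pvBucket, PySem.Dict.get?_insert_of_ne _ _ hm,
      PySem.Dict.get?_setdefault_of_ne _ _ hm] at hq
    exact ⟨(h m l hq).1, fun x hx => lt_trans ((h m l hq).2 x hx) hsj⟩

-- A's redundant sorted() is the identity on the stored list
theorem pvSorted_upd {fs : PySem.Dict Int (List Int)} {start : Int} (h : pvInv fs start) (n : Int) :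
    PySem.List.sorted ((fs.setdefault n []).getD n [] ++ [start]) (fun x => x) false
      = (fs.setdefault n []).getD n [] ++ [start] := by
  apply PySem.List.sorted_eq_self_of_pairwise
  rw [PySem.Dict.getD_setdefault_self fs n [] [], List.pairwise_append]
  obtain ⟨hp, hb⟩ := pvInv_getD h n
  refine ⟨hp.imp le_of_lt, List.pairwise_singleton _ _, fun a ha b hb' => ?_⟩
  simp only [List.mem_singleton] at hb'
  subst hb'
  exact le_of_lt (hb a ha)

-- A's dict update (if-not-contains + insert sorted) equals B's bucket (setdefault + append)
theorem pvUpdA_eq {fs : PySem.Dict Int (List Int)} {start : Int} (h : pvInv fs start) (n : Int) :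
    (if fs.contains n then fs else fs.insert n []).insert n
        (PySem.List.sorted ((if fs.contains n then fs else fs.insert n []).getD n [] ++ [start])
          (fun x => x) false)
      = pvBucket fs start n := by
  have hsd : fs.setdefault n [] = if fs.contains n then fs else fs.insert n [] := by
    by_cases hc : fs.contains n = true
    · rw [PySem.Dict.setdefault_of_contains _ _ hc, if_pos hc]
    · rw [PySem.Dict.setdefault_of_not_contains _ _ (by simpa using hc), if_neg hc]
  rw [pvBucket, ← hsd, pvSorted_upd h n]

theorem pvInnerA_eq (l : List String) (i : Int) :
    pvInnerA l i = (l.dropWhile (· == "."), i + ((l.takeWhile (· == ".")).length : Int)) := by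
  induction l generalizing i with
  | nil => simp [pvInnerA]
  | cons s rest ih =>
    by_cases hs : (s == ".") = true
    · rw [pvInnerA, if_pos hs, ih]
      simp only [List.takeWhile_cons, List.dropWhile_cons, hs, if_true, Prod.mk.injEq,
        List.length_cons, true_and]
      push_cast
      ring
    · have hs' : (s == ".") = false := by simpa using hs
      rw [pvInnerA, if_neg (by simp [hs'])]
      simp [hs']

-- A's run-consuming recursion is the bucket fold over the runs
theorem pvA_main : ∀ (N : Nat) (l : List String), l.length ≤ N →
    ∀ (i : Int) (fs : PySem.Dict Int (List Int)), pvInv fs i →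
    calc_free_space_go l i fs
      = (pvRunsOf l i).foldl (fun fs p => pvBucket fs p.1 p.2) fs := by
  intro N
  induction N with
  | zero =>
    intro l hl i fs _
    obtain rfl := List.length_eq_zero_iff.mp (Nat.le_zero.mp hl)
    rw [calc_free_space_go]
    simp [pvRunsOf]
  | succ N ih =>
    intro l hl i fs hinv
    cases l with
    | nil =>
      rw [calc_free_space_go]
      simp [pvRunsOf]
    | cons s rest =>
      have hrest : rest.length ≤ N := Nat.le_of_succ_le_succ hl
      by_cases hs : (s == ".") = true
      · rw [calc_free_space_go, if_pos hs]
        simp only [pvInnerA_eq]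
        set T := rest.takeWhile (· == ".") with hT
        set R := rest.dropWhile (· == ".") with hR
        have hn : i + 1 + (T.length : Int) - i = 1 + (T.length : Int) := by ring
        rw [hn, pvUpdA_eq hinv]
        have hRlen : R.length ≤ N := le_trans (hR ▸ List.length_dropWhile_le _ _) hrest
        rw [ih R hRlen _ _ (pvInv_upd _ _ hinv (by omega))]
        rw [pvRunsOf, if_pos hs, ← hT, ← hR, List.foldl_cons]
      · rw [calc_free_space_go, if_neg (by simp_all), pvRunsOf, if_neg hs]
        exact ih rest hrest (i + 1) fs (pvInv_mono hinv (by omega))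

-- ===== VERDICT (by name: the statement is the Claim_ definition above) =====
theorem calc_free_space_spec : Claim_equal_calc_free_space := by
  intro block _
  unfold Spec_calc_free_space
  show (calc_free_space_go block 0 PySem.Dict.empty).items
      = ((((pvDotsB block).foldl pvGroupStep []).reverse).foldl
          (fun fs p => pvBucket fs p.1 p.2) PySem.Dict.empty).items
  rw [pvA_main block.length block (le_refl _) 0 PySem.Dict.empty
      (by intro n l hq; simp [PySem.Dict.get?_empty] at hq)]
  rw [show pvDotsB block = pvDotsFrom block 0 from pvDotsB_eq block 0]
  rw [pvGroup_main block.length block (le_refl _) 0 [] (by intro s len rest h; simp at h)]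
  simp
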